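-- pv_equiv track=rewrite | github.com/SXV357/Complete-Python-Developer-in-2022-ZTM | Problems/BPA_Regionals_Practice-4.py | sum_digs_prime
-- ===== SOURCE A (Python) =====
-- def is_prime(n):
--     if n == 0 or n == 1:
--         return False
--     else:
--         for i in range(2, (int(n ** 0.5)) + 1):
--             if n % i == 0:
--                 return False
--     return True
--
-- def sum_digs_prime(arr):
--     primes = []
--     for i in range(len(arr)):
--         if is_prime(arr[i]):
--             primes.append(arr[i])
--     greatest_prime = max(primes)
--     string_version = str(greatest_prime)
--     sum_digs = 0
--     for j in range(len(string_version)):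
--         sum_digs = sum_digs + int(string_version[j])
--     return [arr.index(greatest_prime), sum_digs]
-- ===== SOURCE B (Python) =====
-- def is_prime(n):
--     if n == 0 or n == 1:
--         return False
--     else:
--         for i in range(2, (int(n ** 0.5)) + 1):
--             if n % i == 0:
--                 return False
--     return True
--
-- def sum_digs_prime(arr):
--     best = None
--     best_idx = -1
--     for i, x in enumerate(arr):
--         if is_prime(x) and (best is None or x > best):
--             best = x
--             best_idx = i
--     if best is None:
--         raise ValueError("no prime found in array")
--     s = 0
--     n = best
--     while n > 0:
--         s += n % 10
--         n //= 10
--     return [best_idx, s]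
-- ===== Notes on version B (the rewrite author's own statement) =====
-- stated objective: alternative
-- what changed: Replaces A's three passes (build a primes list, max() over it, arr.index() rescan) by a single forward pass that keeps the running greatest prime and its first index, and sums digits arithmetically with a %10///10 loop instead of iterating over str(g). Pre_ excludes inputs where A raises: arrays containing a negative element (TypeError in is_prime) and arrays with no prime (ValueError from max([])).
-- outside the precondition, e.g. on sum_digs_prime([]): A raises ValueError, B raises ValueError
import Mathlib
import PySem

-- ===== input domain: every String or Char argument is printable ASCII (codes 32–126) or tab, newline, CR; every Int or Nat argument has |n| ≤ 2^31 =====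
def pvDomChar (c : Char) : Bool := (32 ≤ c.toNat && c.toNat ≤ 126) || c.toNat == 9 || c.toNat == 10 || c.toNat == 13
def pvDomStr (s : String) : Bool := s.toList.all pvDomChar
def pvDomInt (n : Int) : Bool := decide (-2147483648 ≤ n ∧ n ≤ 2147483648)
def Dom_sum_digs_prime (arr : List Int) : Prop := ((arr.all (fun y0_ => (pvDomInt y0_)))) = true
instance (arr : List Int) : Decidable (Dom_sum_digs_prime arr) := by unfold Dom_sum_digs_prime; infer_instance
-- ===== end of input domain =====

-- B replaces A's three passes (build a primes list, max() it, arr.index()) by one forward pass keeping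
-- the running best prime and its first index, and sums digits arithmetically (n%10, n//10) instead of via str().

-- ===== PORT A =====
-- shared helper: Python is_prime. int(n**0.5) = Nat.sqrt n.toNat exactly for 0 ≤ n ≤ 2^31 (doubles are
-- exact there); for n < 0 Python's int((-k)**0.5) raises TypeError — those inputs are outside Pre_.
def isPrime (n : Int) : Bool :=
  if n == 0 || n == 1 then false
  else (PySem.List.pyRange 2 (((Nat.sqrt n.toNat : Nat) : Int) + 1) 1).all
        (fun i => !(PySem.Int.mod n i == 0))

def sum_digs_prime (arr : List Int) : List Int :=
  let primes := arr.foldl (fun acc x => if isPrime x then acc ++ [x] else acc) ([] : List Int)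
  match PySem.List.max? primes (fun y => y) with
  | none => []  -- max([]) raises ValueError: excluded by Pre_
  | some g =>
    -- int(str(g)[j]) for a digit char c is c.toNat - 48 (g ≥ 2 here, so all chars are digits)
    let s := (PySem.Int.toChars g).foldl (fun acc c => acc + ((c.toNat : Int) - 48)) 0
    match PySem.List.index? arr g with
    | none => []  -- unreachable: g is an element of arr
    | some j => [(j : Int), s]

-- ===== PORT B =====
def bstep (st : Option (Int × Int)) (p : Int × Int) : Option (Int × Int) :=
  if isPrime p.2 then
    match st with
    | none => some (p.2, p.1)
    | some bi => if bi.1 < p.2 then some (p.2, p.1) else some bi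
  else st

def digitSumLoop (s n : Int) : Int :=
  if _h : 0 < n then digitSumLoop (s + PySem.Int.mod n 10) (PySem.Int.floordiv n 10) else s
termination_by n.toNat
decreasing_by
  rw [PySem.Int.floordiv_eq_ediv_of_pos (by norm_num : (0:Int) < 10)]
  omega

def sum_digs_prime_alt (arr : List Int) : List Int :=
  match (PySem.List.enumerate arr 0).foldl bstep none with
  | none => []  -- raise ValueError: excluded by Pre_
  | some bi => [bi.2, digitSumLoop 0 bi.1]

-- ===== PRECONDITION & SPEC =====
-- Pre_ excludes exactly the inputs where A raises: a negative element (TypeError inside is_prime)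
-- and arrays with no prime element (ValueError from taking the max of the empty primes list). B also raises on both.
def Pre_sum_digs_prime (arr : List Int) : Prop :=
  (∀ x ∈ arr, 0 ≤ x) ∧ ∃ x ∈ arr, x.toNat.Prime
instance (arr : List Int) : Decidable (Pre_sum_digs_prime arr) := by
  unfold Pre_sum_digs_prime; infer_instance

def pvWitness_sum_digs_prime : List Int := [4, 7, 10]

def Spec_sum_digs_prime (arr : List Int) (out : List Int) : Prop := out = sum_digs_prime_alt arr
instance (arr : List Int) (out : List Int) : Decidable (Spec_sum_digs_prime arr out) := by unfold Spec_sum_digs_prime; infer_instance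

-- ===== CLAIM (what is proved, stated in full; the proofs are below) =====
def Claim_equal_sum_digs_prime : Prop := ∀ (arr : List Int), Dom_sum_digs_prime arr → Pre_sum_digs_prime arr → Spec_sum_digs_prime arr (sum_digs_prime arr)

-- ===== LEMMAS AND PROOFS =====

lemma isPrime_of_prime (x : Int) (hx : 0 ≤ x) (hp : Nat.Prime x.toNat) : isPrime x = true := by
  have h2 : 2 ≤ x.toNat := hp.two_le
  have hx2 : 2 ≤ x := by omega
  unfold isPrime
  rw [if_neg (by simp; omega)]
  rw [List.all_eq_true]
  intro i hi
  rw [PySem.List.mem_pyRange_one] at hi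
  simp only [Bool.not_eq_eq_eq_not, Bool.not_true, beq_eq_false_iff_ne, ne_eq]
  intro hmod
  rw [PySem.Int.mod_eq_zero_iff_dvd] at hmod
  have hidvd : i.toNat ∣ x.toNat := by
    have h1 : (i.toNat : Int) = i := by omega
    have h2' : (x.toNat : Int) = x := by omega
    rw [← Int.natCast_dvd_natCast, h1, h2']; exact hmod
  have hs : (Nat.sqrt x.toNat : Int) < (x.toNat : Int) := by
    exact_mod_cast Nat.sqrt_lt_self hp.one_lt
  rcases (hp.eq_one_or_self_of_dvd i.toNat hidvd) with h | h <;> omega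

-- digit sum of a Nat, driven by /10 and %10
def natDigSum (n : Nat) : Int :=
  (n % 10 : Nat) + (if _h : n / 10 = 0 then 0 else natDigSum (n / 10))
termination_by n
decreasing_by omega

lemma digitChar_val (d : Nat) (h : d < 10) : ((Nat.digitChar d).toNat : Int) - 48 = d := by
  interval_cases d <;> decide

lemma toDigitsCore_sum (f : Nat) : ∀ (n : Nat) (acc : List Char), n < f →
    ((Nat.toDigitsCore 10 f n acc).map (fun c => ((c.toNat : Int) - 48))).sum
      = natDigSum n + ((acc.map (fun c => ((c.toNat : Int) - 48))).sum) := by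
  induction f with
  | zero => intro n acc h; omega
  | succ f ih =>
    intro n acc h
    rw [Nat.toDigitsCore]
    by_cases h10 : n / 10 = 0
    · rw [if_pos h10]
      rw [natDigSum, dif_pos h10]
      simp [digitChar_val (n % 10) (Nat.mod_lt _ (by norm_num))]
    · rw [if_neg h10]
      rw [ih (n / 10) _ (by omega)]
      conv_rhs => rw [natDigSum]
      rw [dif_neg h10]
      simp [digitChar_val (n % 10) (Nat.mod_lt _ (by norm_num))]
      ring

lemma asum_eq (g : Int) (hg : 0 ≤ g) :
    (PySem.Int.toChars g).foldl (fun acc c => acc + ((c.toNat : Int) - 48)) 0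
      = natDigSum g.toNat := by
  rw [PySem.List.foldl_add]
  rw [PySem.Int.toChars, if_neg (by omega)]
  rw [Nat.toDigits, toDigitsCore_sum (g.toNat + 1) g.toNat [] (by omega)]
  simp

lemma digitSumLoop_eq (n : Nat) : ∀ s : Int, digitSumLoop s (n : Int) = s + natDigSum n := by
  induction n using Nat.strong_induction_on with
  | _ n ih =>
    intro s
    rw [digitSumLoop]
    by_cases h0 : n = 0
    · subst h0; simp [natDigSum]
    · rw [dif_pos (by omega : (0:Int) < (n : Int))]
      rw [PySem.Int.mod_eq_emod_of_pos (by norm_num : (0:Int) < 10),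
          PySem.Int.floordiv_eq_ediv_of_pos (by norm_num : (0:Int) < 10)]
      have e1 : (n : Int) % 10 = ((n % 10 : Nat) : Int) := by omega
      have e2 : (n : Int) / 10 = ((n / 10 : Nat) : Int) := by omega
      rw [e1, e2, ih (n / 10) (by omega)]
      conv_rhs => rw [natDigSum]
      by_cases h10 : n / 10 = 0
      · rw [dif_pos h10, h10]; simp [natDigSum]
      · rw [dif_neg h10]; ring

lemma foldl_max_eq (x m : Int) (F : List Int)
    (hm : PySem.List.max? F (fun y => y) = some m) : F.foldl max x = max x m := by
  have hmem := PySem.List.max?_mem hm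
  have hmax := PySem.List.max?_isMax hm
  have h1 := PySem.List.le_foldl_max F x
  have h2 := PySem.List.foldl_max_mem F x
  have hmle : m ≤ F.foldl max x := h1.2 m hmem
  have hxle : x ≤ F.foldl max x := h1.1
  rcases h2 with h | h
  · omega
  · have := hmax _ h
    simp only at this
    omega

lemma bfold_char (l : List Int) : ∀ (k : Int) (st : Option (Int × Int)),
    (PySem.List.enumerate l k).foldl bstep st =
      match PySem.List.max? (l.filter (fun x => isPrime x)) (fun y => y) with
      | none => st
      | some m =>
        match st with
        | none => some (m, k + ((PySem.List.index? l m).getD 0 : Nat))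
        | some bi => if bi.1 < m then some (m, k + ((PySem.List.index? l m).getD 0 : Nat))
                     else some bi := by
  induction l with
  | nil =>
    intro k st
    simp [PySem.List.enumerate_nil, PySem.List.max?]
  | cons x t ih =>
    intro k st
    rw [PySem.List.enumerate_cons, List.foldl_cons, ih (k + 1) (bstep st (k, x))]
    by_cases hP : isPrime x = true
    · -- x is prime: filter (x::t) = x :: filter t
      rw [List.filter_cons_of_pos (by simpa using hP)]
      rw [PySem.List.max?_id_cons]
      -- analyse max? of filter t
      cases hF : PySem.List.max? (t.filter (fun x => isPrime x)) (fun y => y) with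
      | none =>
        -- filter t is empty
        have hFe : t.filter (fun x => isPrime x) = [] := by
          rwa [PySem.List.max?_eq_none_iff] at hF
        rw [hFe]
        simp only [List.foldl_nil]
        rw [PySem.List.index?_cons_self x t]
        simp only [bstep, hP, if_pos]
        cases st with
        | none => simp
        | some bi =>
          by_cases hbx : bi.1 < x
          · simp [hbx]
          · simp [hbx]
      | some m =>
        have hmF := PySem.List.max?_mem hF
        have hmP : isPrime m = true := by
          have := List.mem_filter.mp hmF
          simpa using this.2
        have hmt : m ∈ t := (List.mem_filter.mp hmF).1
        have hidx : ∃ j, PySem.List.index? t m = some j := by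
          have := PySem.List.index?_isSome_iff (xs := t) (v := m)
          rcases hh : PySem.List.index? t m with _ | j
          · rw [hh] at this; simp at this; exact absurd hmt this
          · exact ⟨j, rfl⟩
        obtain ⟨j, hj⟩ := hidx
        rw [foldl_max_eq x m _ hF]
        simp only [bstep, hP, if_pos]
        cases st with
        | none =>
          by_cases hxm : x < m
          · have hMne : x ≠ m := by omega
            rw [max_eq_right (le_of_lt hxm), PySem.List.index?_cons_of_ne t hMne, hj]
            simp [hxm]
            omega
          · rw [max_eq_left (by omega : m ≤ x), PySem.List.index?_cons_self x t]
            simp [hxm]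
        | some bi =>
          by_cases hbx : bi.1 < x
          · by_cases hxm : x < m
            · have hMne : x ≠ m := by omega
              rw [max_eq_right (le_of_lt hxm), PySem.List.index?_cons_of_ne t hMne, hj]
              simp [hbx, hxm, (by omega : bi.1 < m)]
              omega
            · rw [max_eq_left (by omega : m ≤ x), PySem.List.index?_cons_self x t]
              simp [hbx, hxm]
          · by_cases hbm : bi.1 < m
            · have hxm : x < m := by omega
              rw [max_eq_right (le_of_lt hxm), PySem.List.index?_cons_of_ne t (by omega : x ≠ m), hj]
              simp [hbx, hbm]
              omega
            · rcases le_total x m with hxm | hxm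
              · rw [max_eq_right hxm]
                simp [hbx, hbm]
              · rw [max_eq_left hxm]
                simp [hbm, (by omega : ¬ bi.1 < x)]
    · -- x not prime: filter (x::t) = filter t, state unchanged
      have hP' : isPrime x = false := by simpa using hP
      rw [List.filter_cons_of_neg (by simpa using hP')]
      simp only [bstep, hP', Bool.false_eq_true, if_false]
      cases hF : PySem.List.max? (t.filter (fun x => isPrime x)) (fun y => y) with
      | none => rfl
      | some m =>
        have hmF := PySem.List.max?_mem hF
        have hmP : isPrime m = true := by
          have := List.mem_filter.mp hmF
          simpa using this.2
        have hmt : m ∈ t := (List.mem_filter.mp hmF).1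
        have hMne : x ≠ m := by
          intro h; rw [h] at hP'; rw [hP'] at hmP; exact absurd hmP (by simp)
        have hidx : ∃ j, PySem.List.index? t m = some j := by
          rcases hh : PySem.List.index? t m with _ | j
          · have := (PySem.List.index?_eq_none_iff t m).mp hh; exact absurd hmt this
          · exact ⟨j, rfl⟩
        obtain ⟨j, hj⟩ := hidx
        have hcons : PySem.List.index? (x :: t) m = (PySem.List.index? t m).map (· + 1) :=
          PySem.List.index?_cons_of_ne t hMne
        simp only [PySem.List.index?_eq_idxOf?] at hcons hj
        cases st with
        | none =>
          simp [hcons, hj]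
          omega
        | some bi =>
          by_cases hbm : bi.1 < m
          · simp [hcons, hj, hbm]
            omega
          · simp [hbm]

-- ===== VERDICT (by name: the statement is the Claim_ definition above) =====
theorem sum_digs_prime_spec : Claim_equal_sum_digs_prime := by
  intro arr _hdom hpre
  obtain ⟨hnn, p, hpmem, hp⟩ := hpre
  unfold Spec_sum_digs_prime
  have hpP : isPrime p = true := isPrime_of_prime p (hnn p hpmem) hp
  have hpF : p ∈ arr.filter (fun x => isPrime x) := List.mem_filter.mpr ⟨hpmem, by simpa using hpP⟩
  have hFne : arr.filter (fun x => isPrime x) ≠ [] := by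
    intro h; rw [h] at hpF; exact absurd hpF (List.not_mem_nil)
  obtain ⟨g, hg⟩ : ∃ g, PySem.List.max? (arr.filter (fun x => isPrime x)) (fun y => y) = some g := by
    rcases hh : PySem.List.max? (arr.filter (fun x => isPrime x)) (fun y => y) with _ | g
    · rw [PySem.List.max?_eq_none_iff] at hh; exact absurd hh hFne
    · exact ⟨g, rfl⟩
  have hgF := PySem.List.max?_mem hg
  have hgarr : g ∈ arr := (List.mem_filter.mp hgF).1
  have hgP : isPrime g = true := by simpa using (List.mem_filter.mp hgF).2
  have hg0 : 0 ≤ g := hnn g hgarr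
  obtain ⟨j, hj⟩ : ∃ j, PySem.List.index? arr g = some j := by
    rcases hh : PySem.List.index? arr g with _ | j
    · exact absurd hgarr ((PySem.List.index?_eq_none_iff arr g).mp hh)
    · exact ⟨j, rfl⟩
  -- evaluate A
  unfold sum_digs_prime
  rw [PySem.List.foldl_append_if_eq_filter]
  simp only [List.nil_append]
  rw [hg]
  simp only [hj]
  -- evaluate B
  unfold sum_digs_prime_alt
  rw [bfold_char arr 0 none, hg]
  simp only [hj, Option.getD_some, zero_add]
  -- digit sums agree
  have hcast : ((g.toNat : Nat) : Int) = g := by omega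
  rw [asum_eq g hg0, ← hcast, digitSumLoop_eq g.toNat 0, zero_add]
  congr 1
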